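-- pv_equiv track=rewrite | github.com/martintufte/rubiks-cube | rubiks_cube/utils/formatting.py | format_wide_notation
-- ===== SOURCE A (Python) =====
-- def format_wide_notation(input_string: str) -> str:
--     """Format lowrcase wide notation with standard wide notation.
--
--     Args:
--         input_string (str): Input string.
--
--     Returns:
--         str: Input string with standard wide notation.
--     """
--
--     output_string = input_string
--     replace_dict = {
--         "u": "Uw",
--         "d": "Dw",
--         "f": "Fw",
--         "b": "Bw",
--         "l": "Lw",
--         "r": "Rw",
--     }
--     for old, new in replace_dict.items():
--         output_string = output_string.replace(old, new)
--
--     return output_string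
-- ===== SOURCE B (Python) =====
-- def format_wide_notation(input_string: str) -> str:
--     """Format lowercase wide notation with standard wide notation."""
--     pieces = []
--     for c in input_string:
--         if c == "u":
--             pieces.append("Uw")
--         elif c == "d":
--             pieces.append("Dw")
--         elif c == "f":
--             pieces.append("Fw")
--         elif c == "b":
--             pieces.append("Bw")
--         elif c == "l":
--             pieces.append("Lw")
--         elif c == "r":
--             pieces.append("Rw")
--         else:
--             pieces.append(c)
--     return "".join(pieces)
-- ===== Notes on version B (the rewrite author's own statement) =====
-- stated objective: alternative
-- what changed: Replaces six sequential full-string str.replace passes driven by a dict with a single explicit character loop that maps each character through an if-chain into an accumulator list and joins it once; correct because no replacement value contains a lowercase key letter.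
import Mathlib
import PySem

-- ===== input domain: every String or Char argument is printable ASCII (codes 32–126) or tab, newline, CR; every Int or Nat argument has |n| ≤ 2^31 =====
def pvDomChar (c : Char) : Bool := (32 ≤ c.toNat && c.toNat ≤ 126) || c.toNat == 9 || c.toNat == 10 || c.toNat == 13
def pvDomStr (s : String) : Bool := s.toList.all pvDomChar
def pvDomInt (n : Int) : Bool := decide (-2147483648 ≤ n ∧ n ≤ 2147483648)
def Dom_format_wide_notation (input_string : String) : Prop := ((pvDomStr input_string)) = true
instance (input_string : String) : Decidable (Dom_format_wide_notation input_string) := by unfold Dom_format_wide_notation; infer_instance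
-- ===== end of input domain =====

-- B replaces A's six dict-driven sequential full-string replace passes with one explicit
-- character loop (if-chain into an accumulator list, joined once); return values are identical.

-- ===== PORT A =====
-- A builds a dict of lowercase→wide entries and runs output.replace(old, new) once per entry.
def wideDict : PySem.Dict String String :=
  PySem.Dict.ofList [("u", "Uw"), ("d", "Dw"), ("f", "Fw"), ("b", "Bw"), ("l", "Lw"), ("r", "Rw")]

def format_wide_notation (input_string : String) : String :=
  wideDict.items.foldl (fun out p => PySem.Str.replace out p.1 p.2) input_string

-- ===== PORT B =====
-- B's if-chain for one character (the elif ladder of Source B)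
def widenChar (c : Char) : String :=
  if c = 'u' then "Uw"
  else if c = 'd' then "Dw"
  else if c = 'f' then "Fw"
  else if c = 'b' then "Bw"
  else if c = 'l' then "Lw"
  else if c = 'r' then "Rw"
  else String.ofList [c]

-- the loop: walk the characters, appending each translated piece to the accumulator
def widenLoop : List Char → List String → List String
  | [], pieces => pieces
  | c :: rest, pieces => widenLoop rest (pieces ++ [widenChar c])

def format_wide_notation_alt (input_string : String) : String :=
  PySem.Str.join "" (widenLoop input_string.toList [])

-- ===== PRECONDITION & SPEC =====
def Spec_format_wide_notation (input_string : String) (out : String) : Prop := out = format_wide_notation_alt input_string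
instance (input_string : String) (out : String) : Decidable (Spec_format_wide_notation input_string out) := by unfold Spec_format_wide_notation; infer_instance

-- ===== CLAIM (what is proved, stated in full; the proofs are below) =====
def Claim_equal_format_wide_notation : Prop := ∀ (input_string : String), Dom_format_wide_notation input_string → Spec_format_wide_notation input_string (format_wide_notation input_string)

-- ===== LEMMAS AND PROOFS =====

-- one char-by-char replacement step (replace with a single-character pattern)
def repOne (k : Char) (new : List Char) (s : List Char) : List Char :=
  s.flatMap (fun c => if k = c then new else [c])

theorem replace_go_single (k : Char) (new : List Char) (fuel : Nat) (l acc : List Char)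
    (h : l.length ≤ fuel) :
    PySem.Chars.replace.go [k] new fuel l acc = acc.reverse ++ repOne k new l := by
  induction fuel generalizing l acc with
  | zero =>
    cases l with
    | nil => simp [PySem.Chars.replace.go, repOne]
    | cons c t => simp at h
  | succ n ih =>
    cases l with
    | nil => simp [PySem.Chars.replace.go, repOne]
    | cons c t =>
      rw [PySem.Chars.replace.go]
      simp only [List.isPrefixOf, repOne, List.flatMap_cons]
      by_cases hk : k = c
      · subst hk
        simp only [beq_self_eq_true, Bool.true_and, if_pos, List.length_cons,
          List.drop_succ_cons]
        rw [ih _ _ (by simpa using h)]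
        simp [repOne]
      · have : (k == c) = false := by simpa using hk
        simp only [this, Bool.false_and, if_neg Bool.false_ne_true]
        rw [ih _ _ (by simpa using h)]
        simp [repOne, hk]

theorem replace_single (k : Char) (new s : List Char) :
    PySem.Chars.replace s [k] new = repOne k new s := by
  rw [PySem.Chars.replace]
  simp only [List.isEmpty_cons, if_neg Bool.false_ne_true]
  simpa using replace_go_single k new s.length s []

theorem repOne_append (k : Char) (new : List Char) (x y : List Char) :
    repOne k new (x ++ y) = repOne k new x ++ repOne k new y := by
  simp [repOne]

-- the six-step chain of A, on char lists
def chainA (s : List Char) : List Char :=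
  repOne 'r' "Rw".toList (repOne 'l' "Lw".toList (repOne 'b' "Bw".toList
    (repOne 'f' "Fw".toList (repOne 'd' "Dw".toList (repOne 'u' "Uw".toList s)))))

theorem chainA_append (x y : List Char) : chainA (x ++ y) = chainA x ++ chainA y := by
  simp [chainA, repOne_append]

theorem chainA_single (c : Char) : chainA [c] = (widenChar c).toList := by
  by_cases h1 : c = 'u'; · subst h1; decide
  by_cases h2 : c = 'd'; · subst h2; decide
  by_cases h3 : c = 'f'; · subst h3; decide
  by_cases h4 : c = 'b'; · subst h4; decide
  by_cases h5 : c = 'l'; · subst h5; decide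
  by_cases h6 : c = 'r'; · subst h6; decide
  simp [chainA, repOne, widenChar, h1, h2, h3, h4, h5, h6,
    Ne.symm h1, Ne.symm h2, Ne.symm h3, Ne.symm h4, Ne.symm h5, Ne.symm h6,
    String.toList_ofList]

theorem chainA_eq_flatMap (s : List Char) :
    chainA s = s.flatMap (fun c => (widenChar c).toList) := by
  induction s with
  | nil => decide
  | cons c t ih =>
    have : (c :: t) = [c] ++ t := rfl
    rw [this, chainA_append, ih, chainA_single]
    simp

theorem widenLoop_eq (s : List Char) (acc : List String) :
    widenLoop s acc = acc ++ s.map widenChar := by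
  induction s generalizing acc with
  | nil => simp [widenLoop]
  | cons c t ih => simp [widenLoop, ih]

theorem join_nil_flatten (l : List (List Char)) : PySem.Chars.join [] l = l.flatten := by
  simp only [PySem.Chars.join, List.intercalate]
  induction l with
  | nil => rfl
  | cons a t ih =>
    cases t with
    | nil => rfl
    | cons b u =>
      rw [show List.intersperse ([] : List Char) (a :: b :: u)
            = a :: [] :: List.intersperse [] (b :: u) from by simp [List.intersperse]]
      simp only [List.flatten_cons] at ih ⊢
      rw [← ih]
      simp

-- ===== VERDICT (by name: the statement is the Claim_ definition above) =====
theorem format_wide_notation_spec : Claim_equal_format_wide_notation := by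
  intro s _
  unfold Spec_format_wide_notation format_wide_notation format_wide_notation_alt
  rw [← String.toList_inj]
  rw [widenLoop_eq, PySem.Str.toList_join]
  rw [show ("" : String).toList = [] from rfl, join_nil_flatten]
  have hA : (wideDict.items.foldl (fun out p => PySem.Str.replace out p.1 p.2) s).toList
      = chainA s.toList := by
    have hw : wideDict.items = [("u", "Uw"), ("d", "Dw"), ("f", "Fw"), ("b", "Bw"), ("l", "Lw"), ("r", "Rw")] := by decide
    simp only [hw, List.foldl]
    rw [PySem.Str.toList_replace, PySem.Str.toList_replace, PySem.Str.toList_replace,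
      PySem.Str.toList_replace, PySem.Str.toList_replace, PySem.Str.toList_replace]
    simp only [chainA, show "u".toList = ['u'] from rfl, show "d".toList = ['d'] from rfl,
      show "f".toList = ['f'] from rfl, show "b".toList = ['b'] from rfl,
      show "l".toList = ['l'] from rfl, show "r".toList = ['r'] from rfl]
    rw [replace_single, replace_single, replace_single, replace_single, replace_single,
      replace_single]
  rw [hA, chainA_eq_flatMap]
  simp [List.flatMap, List.map_map, Function.comp_def]
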